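-- pv_equiv track=rewrite | github.com/timleung22/AOC2017 | y2018/day6.py | buildGridWithSafeArea
-- ===== SOURCE A (Python) =====
-- maxDistance = 32
--
-- def manhattanDist(pointA, pointB):
--     return abs(pointA[0]-pointB[0]) + abs(pointA[1]-pointB[1])
--
-- def calTotalManhattanDistances(coordinates, coord):
--     accDistance = 0
--     for eachC in coordinates:
--         accDistance += manhattanDist(eachC, coord)
--     return accDistance
--
-- def buildGridWithSafeArea(coordinates, edges):
--     grid = [[0 for x in range(edges[2]+1-edges[0])] for y in range(edges[3]+1-edges[1])]
--     for y in range(edges[1], edges[3]+1):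
--         for x in range(edges[0], edges[2]+1):
--             distancesSum = calTotalManhattanDistances(coordinates, [x, y])
--             if distancesSum < maxDistance:
--                 grid[y-edges[1]][x-edges[0]] = 1
--     return grid
-- ===== SOURCE B (Python) =====
-- maxDistance = 32
--
-- def buildGridWithSafeArea(coordinates, edges):
--     x0, y0, x1, y1 = edges[0], edges[1], edges[2], edges[3]
--     height = y1 + 1 - y0
--     width = x1 + 1 - x0
--     if height <= 0:
--         return []
--     if width <= 0:
--         return [[] for _ in range(height)]
--     colSums = [sum(abs(c[0] - x) for c in coordinates) for x in range(x0, x1 + 1)]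
--     rowSums = [sum(abs(c[1] - y) for c in coordinates) for y in range(y0, y1 + 1)]
--     return [[1 if r + c < maxDistance else 0 for c in colSums] for r in rowSums]
-- ===== Notes on version B (the rewrite author's own statement) =====
-- stated objective: alternative
-- what changed: B exploits that Manhattan distance separates per axis: it precomputes per-column sums of |xi-x| and per-row sums of |yi-y| once and builds each cell by adding two precomputed numbers (short-circuiting empty grids), instead of A's rescan of all N coordinates at every grid cell.
import Mathlib
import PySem

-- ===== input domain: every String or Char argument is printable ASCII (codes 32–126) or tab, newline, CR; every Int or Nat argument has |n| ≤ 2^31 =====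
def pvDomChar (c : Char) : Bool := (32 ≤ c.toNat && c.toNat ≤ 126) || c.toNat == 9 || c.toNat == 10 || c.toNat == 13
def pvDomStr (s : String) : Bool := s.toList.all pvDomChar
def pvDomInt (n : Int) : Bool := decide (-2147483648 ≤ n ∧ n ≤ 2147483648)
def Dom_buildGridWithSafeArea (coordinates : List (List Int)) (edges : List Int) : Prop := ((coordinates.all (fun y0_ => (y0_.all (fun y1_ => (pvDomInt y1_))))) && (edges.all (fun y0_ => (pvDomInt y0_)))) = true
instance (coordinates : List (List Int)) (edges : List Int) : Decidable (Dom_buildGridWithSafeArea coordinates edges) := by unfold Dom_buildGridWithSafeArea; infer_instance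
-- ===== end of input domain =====

-- B replaces A's per-cell rescan of all coordinates by precomputed per-column and
-- per-row axis sums (Manhattan distance separates per axis); objective: alternative algorithm.

-- ===== PORT A =====
def manhattanDist (pointA pointB : List Int) : Int :=
  |PySem.List.pyGetD pointA 0 0 - PySem.List.pyGetD pointB 0 0| +
  |PySem.List.pyGetD pointA 1 0 - PySem.List.pyGetD pointB 1 0|

def calTotalManhattanDistances (coordinates : List (List Int)) (coord : List Int) : Int :=
  coordinates.foldl (fun accDistance eachC => accDistance + manhattanDist eachC coord) 0

-- indices y-edges[1] and x-edges[0] are ≥ 0 inside the loops, so .toNat is exact there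
def buildGridWithSafeArea (coordinates : List (List Int)) (edges : List Int) : List (List Int) :=
  let e0 := PySem.List.pyGetD edges 0 0
  let e1 := PySem.List.pyGetD edges 1 0
  let e2 := PySem.List.pyGetD edges 2 0
  let e3 := PySem.List.pyGetD edges 3 0
  let grid := (PySem.List.pyRange 0 (e3 + 1 - e1) 1).map
    (fun _ => (PySem.List.pyRange 0 (e2 + 1 - e0) 1).map (fun _ => (0 : Int)))
  (PySem.List.pyRange e1 (e3 + 1) 1).foldl (fun g y =>
    (PySem.List.pyRange e0 (e2 + 1) 1).foldl (fun g x =>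
      let distancesSum := calTotalManhattanDistances coordinates [x, y]
      if distancesSum < 32 then
        g.set (y - e1).toNat ((g.getD (y - e1).toNat []).set (x - e0).toNat 1)
      else g) g) grid

-- ===== PORT B =====
def buildGridWithSafeArea_alt (coordinates : List (List Int)) (edges : List Int) : List (List Int) :=
  let x0 := PySem.List.pyGetD edges 0 0
  let y0 := PySem.List.pyGetD edges 1 0
  let x1 := PySem.List.pyGetD edges 2 0
  let y1 := PySem.List.pyGetD edges 3 0
  let height := y1 + 1 - y0
  let width := x1 + 1 - x0
  if height ≤ 0 then []
  else if width ≤ 0 then (PySem.List.pyRange 0 height 1).map (fun _ => [])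
  else
    let colSums := (PySem.List.pyRange x0 (x1 + 1) 1).map
      (fun x => (coordinates.map (fun c => |PySem.List.pyGetD c 0 0 - x|)).sum)
    let rowSums := (PySem.List.pyRange y0 (y1 + 1) 1).map
      (fun y => (coordinates.map (fun c => |PySem.List.pyGetD c 1 0 - y|)).sum)
    rowSums.map (fun r => colSums.map (fun c => if r + c < 32 then (1 : Int) else 0))

-- ===== PRECONDITION & SPEC =====
-- Pre_ admits exactly the inputs on which A returns: at least 4 edges, and when both
-- grid dimensions are nonempty every coordinate must have ≥ 2 components (otherwise
-- A raises IndexError inside the loops).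
def Pre_buildGridWithSafeArea (coordinates : List (List Int)) (edges : List Int) : Prop :=
  4 ≤ edges.length ∧
    ((edges.getD 1 0 ≤ edges.getD 3 0 ∧ edges.getD 0 0 ≤ edges.getD 2 0) →
      ∀ c ∈ coordinates, 2 ≤ c.length)
instance (coordinates : List (List Int)) (edges : List Int) : Decidable (Pre_buildGridWithSafeArea coordinates edges) := by unfold Pre_buildGridWithSafeArea; infer_instance

def pvWitness_buildGridWithSafeArea : List (List Int) × List Int := ([[1, 1], [2, 3]], [0, 0, 3, 3])

def Spec_buildGridWithSafeArea (coordinates : List (List Int)) (edges : List Int) (out : List (List Int)) : Prop := out = buildGridWithSafeArea_alt coordinates edges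
instance (coordinates : List (List Int)) (edges : List Int) (out : List (List Int)) : Decidable (Spec_buildGridWithSafeArea coordinates edges out) := by unfold Spec_buildGridWithSafeArea; infer_instance

-- ===== CLAIM (what is proved, stated in full; the proofs are below) =====
def Claim_equal_buildGridWithSafeArea : Prop := ∀ (coordinates : List (List Int)) (edges : List Int), Dom_buildGridWithSafeArea coordinates edges → Pre_buildGridWithSafeArea coordinates edges → Spec_buildGridWithSafeArea coordinates edges (buildGridWithSafeArea coordinates edges)

-- ===== LEMMAS AND PROOFS =====

-- pyGetD on the literal pair [x, y]
theorem pv_pyGetD_pair_zero (x y : Int) : PySem.List.pyGetD [x, y] 0 0 = x := by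
  simp [PySem.List.pyGetD, PySem.List.pyGet?, PySem.List.pyIdx?]

theorem pv_pyGetD_pair_one (x y : Int) : PySem.List.pyGetD [x, y] 1 0 = y := by
  simp [PySem.List.pyGetD, PySem.List.pyGet?, PySem.List.pyIdx?]

-- Manhattan distance sums decompose into the two axis sums
theorem pv_calTotal_decomp (coords : List (List Int)) (x y acc : Int) :
    coords.foldl (fun a c => a + manhattanDist c [x, y]) acc =
    acc + (coords.map (fun c => |PySem.List.pyGetD c 0 0 - x|)).sum
        + (coords.map (fun c => |PySem.List.pyGetD c 1 0 - y|)).sum := by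
  induction coords generalizing acc with
  | nil => simp
  | cons c cs ih =>
    simp only [List.foldl_cons, List.map_cons, List.sum_cons]
    rw [ih]
    simp only [manhattanDist, pv_pyGetD_pair_zero, pv_pyGetD_pair_one]
    ring

-- the inner x-loop, acting on a row of zeros, produces the indicator row
theorem pv_rowFold (P : Int → Prop) [DecidablePred P] (x0 b : Int) :
    ∀ (s : List Int) (a : Int) (p : List Int), x0 ≤ a → p.length = (a - x0).toNat →
    s.length = (b - a).toNat → (∀ v ∈ s, v = 0) →
    (PySem.List.pyRange a b 1).foldl
        (fun row x => if P x then row.set (x - x0).toNat 1 else row) (p ++ s) =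
    p ++ (PySem.List.pyRange a b 1).map (fun x => if P x then (1 : Int) else 0)
  | [], a, p, _, _, hs, _ => by
    rw [PySem.List.pyRange_one_eq_nil (by simp at hs; omega)]
    simp
  | v :: s', a, p, hax, hp, hs, h0 => by
    have hab : a < b := by simp at hs; omega
    rw [PySem.List.pyRange_one_cons hab]
    simp only [List.foldl_cons, List.map_cons]
    have hv : v = 0 := h0 v (by simp)
    have hstate : (if P a then (p ++ v :: s').set (a - x0).toNat 1 else (p ++ v :: s')) =
        (p ++ [if P a then (1 : Int) else 0]) ++ s' := by
      rw [show (a - x0).toNat = p.length by omega]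
      split_ifs <;> simp [hv]
    rw [hstate, pv_rowFold P x0 b s' (a + 1) _ (by omega) (by simp; omega)
      (by simp at hs ⊢; omega) (fun w hw => h0 w (by simp [hw]))]
    simp
termination_by s => s.length

-- the inner loop only rewrites row r of the grid
theorem pv_innerLift (P : Int → Prop) [DecidablePred P] (x0 : Int) (r : Nat) :
    ∀ (xs : List Int) (g : List (List Int)), r < g.length →
    xs.foldl (fun g x =>
        if P x then g.set r ((g.getD r []).set (x - x0).toNat 1) else g) g =
    g.set r (xs.foldl (fun row x => if P x then row.set (x - x0).toNat 1 else row)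
        (g.getD r []))
  | [], g, hr => by
    simp only [List.foldl_nil]
    rw [List.getD_eq_getElem _ _ hr, List.set_getElem_self]
  | x :: xs, g, hr => by
    simp only [List.foldl_cons]
    have hone : (if P x then g.set r ((g.getD r []).set (x - x0).toNat 1) else g) =
        g.set r (if P x then (g.getD r []).set (x - x0).toNat 1 else g.getD r []) := by
      split_ifs with h
      · rfl
      · rw [List.getD_eq_getElem _ _ hr, List.set_getElem_self]
    rw [hone, pv_innerLift P x0 r xs _ (by simpa using hr), List.set_set]
    congr 1
    rw [List.getD_eq_getElem _ _ (by simpa using hr)]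
    simp [List.getElem_set_self]

-- the outer y-loop over a grid of zero rows produces the indicator grid
theorem pv_gridFold (Pf : Int → Int → Prop) [inst : ∀ y x, Decidable (Pf y x)]
    (x0 x1 y0 b : Int) (row0 : List Int) (hzero : ∀ v ∈ row0, v = 0) :
    ∀ (s : List (List Int)) (a : Int) (p : List (List Int)), y0 ≤ a →
    p.length = (a - y0).toNat → s.length = (b - a).toNat → (∀ r ∈ s, r = row0) →
    row0.length = (x1 + 1 - x0).toNat →
    (PySem.List.pyRange a b 1).foldl (fun g y =>
      (PySem.List.pyRange x0 (x1 + 1) 1).foldl (fun g x =>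
        if Pf y x then
          g.set (y - y0).toNat ((g.getD (y - y0).toNat []).set (x - x0).toNat 1)
        else g) g) (p ++ s) =
    p ++ (PySem.List.pyRange a b 1).map (fun y =>
      (PySem.List.pyRange x0 (x1 + 1) 1).map (fun x => if Pf y x then (1 : Int) else 0))
  | [], a, p, _, _, hs, _, _ => by
    rw [show PySem.List.pyRange a b 1 = [] from
      PySem.List.pyRange_one_eq_nil (by simp at hs; omega)]
    simp
  | r0 :: s', a, p, hax, hp, hs, hrows, hlen => by
    have hab : a < b := by simp at hs; omega
    rw [PySem.List.pyRange_one_cons hab]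
    simp only [List.foldl_cons, List.map_cons]
    have hr0 : r0 = row0 := hrows r0 (by simp)
    have hidx : (a - y0).toNat = p.length := by omega
    have hgetd : (p ++ r0 :: s').getD p.length [] = row0 := by
      simp [List.getD, hr0]
    have hstate : (PySem.List.pyRange x0 (x1 + 1) 1).foldl (fun g x =>
          if Pf a x then
            g.set (a - y0).toNat ((g.getD (a - y0).toNat []).set (x - x0).toNat 1)
          else g) (p ++ r0 :: s') =
        (p ++ [(PySem.List.pyRange x0 (x1 + 1) 1).map
            (fun x => if Pf a x then (1 : Int) else 0)]) ++ s' := by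
      rw [hidx, pv_innerLift (Pf a) x0 p.length _ _ (by simp), hgetd]
      have := pv_rowFold (Pf a) x0 (x1 + 1) row0 x0 [] le_rfl (by simp) (by simpa using hlen) hzero
      simp only [List.nil_append] at this
      rw [this]
      simp
    rw [hstate, pv_gridFold Pf x0 x1 y0 b row0 hzero s' (a + 1) _ (by omega) (by simp; omega)
      (by simp at hs ⊢; omega) (fun w hw => hrows w (by simp [hw])) hlen]
    simp
termination_by s => s.length

-- a fold whose body ignores the list leaves the accumulator unchanged
theorem pv_foldl_const (l : List Int) (g : List (List Int)) :
    l.foldl (fun g _ => g) g = g := by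
  induction l generalizing g with
  | nil => rfl
  | cons x xs ih => exact ih g

-- ===== VERDICT (by name: the statement is the Claim_ definition above) =====
theorem buildGridWithSafeArea_spec : Claim_equal_buildGridWithSafeArea := by
  intro coords edges _ _
  unfold Spec_buildGridWithSafeArea
  have hA : buildGridWithSafeArea coords edges =
      (PySem.List.pyRange (PySem.List.pyGetD edges 1 0) (PySem.List.pyGetD edges 3 0 + 1) 1).foldl
        (fun g y =>
          (PySem.List.pyRange (PySem.List.pyGetD edges 0 0) (PySem.List.pyGetD edges 2 0 + 1) 1).foldl
            (fun g x =>
              if calTotalManhattanDistances coords [x, y] < 32 then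
                g.set (y - PySem.List.pyGetD edges 1 0).toNat
                  ((g.getD (y - PySem.List.pyGetD edges 1 0).toNat []).set
                    (x - PySem.List.pyGetD edges 0 0).toNat 1)
              else g) g)
        ((PySem.List.pyRange 0 (PySem.List.pyGetD edges 3 0 + 1 - PySem.List.pyGetD edges 1 0) 1).map
          (fun _ => (PySem.List.pyRange 0 (PySem.List.pyGetD edges 2 0 + 1 - PySem.List.pyGetD edges 0 0) 1).map
            (fun _ => (0 : Int)))) := rfl
  by_cases hH : PySem.List.pyGetD edges 3 0 + 1 - PySem.List.pyGetD edges 1 0 ≤ 0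
  · -- empty height: A's grid and loops are both empty
    have hB : buildGridWithSafeArea_alt coords edges = [] := by
      simp only [buildGridWithSafeArea_alt]
      rw [if_pos hH]
    rw [hA, hB,
      show PySem.List.pyRange (PySem.List.pyGetD edges 1 0) (PySem.List.pyGetD edges 3 0 + 1) 1 = []
        from PySem.List.pyRange_one_eq_nil (by omega),
      show PySem.List.pyRange 0 (PySem.List.pyGetD edges 3 0 + 1 - PySem.List.pyGetD edges 1 0) 1 = []
        from PySem.List.pyRange_one_eq_nil (by omega)]
    rfl
  by_cases hW : PySem.List.pyGetD edges 2 0 + 1 - PySem.List.pyGetD edges 0 0 ≤ 0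
  · -- empty width: A's inner loop never runs, every row stays []
    have hB : buildGridWithSafeArea_alt coords edges =
        (PySem.List.pyRange 0 (PySem.List.pyGetD edges 3 0 + 1 - PySem.List.pyGetD edges 1 0) 1).map
          (fun _ => ([] : List Int)) := by
      simp only [buildGridWithSafeArea_alt]
      rw [if_neg hH, if_pos hW]
    rw [hA, hB,
      show PySem.List.pyRange (PySem.List.pyGetD edges 0 0) (PySem.List.pyGetD edges 2 0 + 1) 1 = []
        from PySem.List.pyRange_one_eq_nil (by omega),
      show PySem.List.pyRange 0 (PySem.List.pyGetD edges 2 0 + 1 - PySem.List.pyGetD edges 0 0) 1 = []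
        from PySem.List.pyRange_one_eq_nil (by omega)]
    simp only [List.foldl_nil, List.map_nil, pv_foldl_const]
  · -- both dimensions nonempty: axis decomposition
    have hB : buildGridWithSafeArea_alt coords edges =
        (PySem.List.pyRange (PySem.List.pyGetD edges 1 0) (PySem.List.pyGetD edges 3 0 + 1) 1).map
          (fun y => (PySem.List.pyRange (PySem.List.pyGetD edges 0 0) (PySem.List.pyGetD edges 2 0 + 1) 1).map
            (fun x =>
              if (coords.map (fun c => |PySem.List.pyGetD c 1 0 - y|)).sum +
                 (coords.map (fun c => |PySem.List.pyGetD c 0 0 - x|)).sum < 32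
              then (1 : Int) else 0)) := by
      simp only [buildGridWithSafeArea_alt]
      rw [if_neg hH, if_neg hW]
      simp only [List.map_map]
      rfl
    rw [hA, hB]
    have hgrid := pv_gridFold (fun y x => calTotalManhattanDistances coords [x, y] < 32)
        (PySem.List.pyGetD edges 0 0) (PySem.List.pyGetD edges 2 0)
        (PySem.List.pyGetD edges 1 0) (PySem.List.pyGetD edges 3 0 + 1)
        ((PySem.List.pyRange 0 (PySem.List.pyGetD edges 2 0 + 1 - PySem.List.pyGetD edges 0 0) 1).map
          (fun _ => (0 : Int)))
        (by intro v hv; simp at hv; exact hv.2)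
        ((PySem.List.pyRange 0 (PySem.List.pyGetD edges 3 0 + 1 - PySem.List.pyGetD edges 1 0) 1).map
          (fun _ => (PySem.List.pyRange 0 (PySem.List.pyGetD edges 2 0 + 1 - PySem.List.pyGetD edges 0 0) 1).map
            (fun _ => (0 : Int))))
        (PySem.List.pyGetD edges 1 0) [] le_rfl (by simp) (by simp)
        (by intro r hr; simp at hr ⊢; exact hr.2) (by simp)
    simp only [List.nil_append] at hgrid
    rw [hgrid]
    refine List.map_congr_left fun y hy => List.map_congr_left fun x hx => ?_
    have h : calTotalManhattanDistances coords [x, y] =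
        (coords.map (fun c => |PySem.List.pyGetD c 1 0 - y|)).sum +
        (coords.map (fun c => |PySem.List.pyGetD c 0 0 - x|)).sum := by
      unfold calTotalManhattanDistances
      rw [pv_calTotal_decomp]
      ring
    rw [h]
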